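-- pv_equiv track=rewrite | github.com/SergioAle210/Syntax-Par | lex/yalex_utils.py | convert_optional_operator
-- ===== SOURCE A (Python) =====
-- def convert_optional_operator(expr: str) -> str:
--     """
--     Convierte el operador '?' en su forma: R?  -->  (R|λ),
--     dejando los '?' escapados como literales.
--
--     La conversión se realiza detectando el operando inmediatamente anterior al '?':
--       - Si el operando es un grupo entre paréntesis: se toma el grupo completo.
--       - Si el operando es un conjunto entre corchetes: se toma la subcadena entre '[' y ']'.
--       - Si es otro caso, se toma el último carácter.
--
--     Ejemplos:
--       "a?"           se transforma a "(a|λ)"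
--       "(ab)?"        se transforma a "((ab)|λ)"
--       "['+''-']?"    se transforma a "(['+''-']|λ)"
--     """
--     output = ""
--     i = 0
--     while i < len(expr):
--         if expr[i] == "?":
--             # Si el '?' está escapado, se deja como literal.
--             if i > 0 and expr[i - 1] == "\\":
--                 output += "?"
--                 i += 1
--                 continue
--
--             # Si hay algo previo, determinar el operando a convertir
--             if len(output) > 0:
--                 last_char = output[-1]
--                 if last_char == ")":
--                     # Se asume que el operando es un grupo entre paréntesis.
--                     count = 1
--                     j = len(output) - 2
--                     while j >= 0:
--                         if output[j] == ")":
--                             count += 1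
--                         elif output[j] == "(":
--                             count -= 1
--                             if count == 0:
--                                 break
--                         j -= 1
--                     operand = output[j:]
--                     output = output[:j]
--                     transformed = "(" + operand + "|λ)"
--                     output += transformed
--                 elif last_char == "]":
--                     # Se asume que el operando es un conjunto entre corchetes.
--                     count = 1
--                     j = len(output) - 2
--                     while j >= 0:
--                         if output[j] == "]":
--                             count += 1
--                         elif output[j] == "[":
--                             count -= 1
--                             if count == 0:
--                                 break
--                         j -= 1
--                     operand = output[j:]
--                     output = output[:j]
--                     transformed = "(" + operand + "|λ)"
--                     output += transformed
--                 else: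
--                     # Caso por defecto: se toma el último carácter.
--                     operand = output[-1]
--                     output = output[:-1]
--                     transformed = "(" + operand + "|λ)"
--                     output += transformed
--             else:
--                 # Caso atípico: no hay operando previo; se asume solo la cadena vacía.
--                 output += "(λ)"
--             i += 1
--         else:
--             output += expr[i]
--             i += 1
--     return output
-- ===== SOURCE B (Python) =====
-- def _operand_start(buf, open_ch, close_ch):
--     # Forward pass over buf[:-1] keeping a stack of unmatched open_ch positions;
--     # the operand starts at the deepest-open position on top of the stack.
--     stack = []
--     for pos in range(len(buf) - 1):
--         ch = buf[pos]
--         if ch == open_ch: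
--             stack.append(pos)
--         elif ch == close_ch and stack:
--             stack.pop()
--     return stack[-1] if stack else None
--
--
-- def convert_optional_operator(expr: str) -> str:
--     out = []
--     for i, c in enumerate(expr):
--         if c == "?" and not (i > 0 and expr[i - 1] == "\\"):
--             if not out:
--                 out += "(λ)"
--                 continue
--             last = out[-1]
--             if last == ")":
--                 j = _operand_start(out, "(", ")")
--             elif last == "]":
--                 j = _operand_start(out, "[", "]")
--             else:
--                 j = None
--             if j is None:
--                 j = len(out) - 1
--             out[j:] = ["("] + out[j:] + ["|", "λ", ")"]
--         else:
--             out.append(c)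
--     return "".join(out)
-- ===== Notes on version B (the rewrite author's own statement) =====
-- stated objective: alternative
-- what changed: A finds each '?'-operand by a backward character scan with a nesting counter (duplicated for parens and brackets) on a growing string; B instead finds it with one generic forward pass that keeps a stack of unmatched opener positions and takes the top of the stack, building the output as a char list joined once.
import Mathlib
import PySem

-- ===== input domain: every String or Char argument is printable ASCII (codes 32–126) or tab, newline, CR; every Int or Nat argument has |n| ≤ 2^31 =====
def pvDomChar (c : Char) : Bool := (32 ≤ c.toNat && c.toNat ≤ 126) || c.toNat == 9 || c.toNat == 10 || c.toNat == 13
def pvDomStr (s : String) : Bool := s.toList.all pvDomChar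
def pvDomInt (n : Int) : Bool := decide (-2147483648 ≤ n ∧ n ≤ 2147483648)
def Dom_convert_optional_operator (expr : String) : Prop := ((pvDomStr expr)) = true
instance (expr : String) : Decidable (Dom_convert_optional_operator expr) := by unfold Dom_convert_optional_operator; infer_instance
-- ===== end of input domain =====

-- B re-implements A's per-'?' backward counting scan as a single generic forward pass that
-- keeps a stack of unmatched opener positions (one helper for both bracket kinds); same
-- values on every input (objective: alternative decomposition, not claimed faster).

-- ===== PORT A =====
-- A's inner `while j >= 0` backward scan; A repeats the identical loop body for both
-- bracket kinds, so it is transliterated once with the two characters as parameters.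
-- The loop index j is carried as the Nat m = j + 1 (structural recursion), so `m = 0`
-- is Python's fall-through with j = -1 (returned as is) and a `count == 0` break
-- returns the current j = m - 1.  output[j] is always in range here (0 ≤ j < len),
-- so pyGetD's default is never read.
def pvScanAux (output : List Char) (closec openc : Char) (count : Int) : Nat → Int
  | 0 => -1
  | m + 1 =>
    if PySem.List.pyGetD output ((m : Nat) : Int) ' ' = closec then
      pvScanAux output closec openc (count + 1) m
    else if PySem.List.pyGetD output ((m : Nat) : Int) ' ' = openc then
      (if count - 1 = 0 then ((m : Nat) : Int) else pvScanAux output closec openc (count - 1) m)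
    else
      pvScanAux output closec openc count m

def pvScanA (output : List Char) (closec openc : Char) (count : Int) (j : Int) : Int :=
  pvScanAux output closec openc count (j + 1).toNat

-- A's outer `while i < len(expr)` loop, carrying output (a Python str, as List Char);
-- structural recursion on the fuel n = len(expr) - i, with Python's own loop guard kept
def pvLoopAux (expr : List Char) : Nat → Nat → List Char → List Char
  | 0, _, output => output
  | n + 1, i, output =>
    if h : i < expr.length then
      if expr[i] = '?' then
        if 0 < i ∧ PySem.List.pyGetD expr ((i : Int) - 1) ' ' = '\\' then
          pvLoopAux expr n (i + 1) (output ++ ['?'])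
        else if 0 < output.length then
          if PySem.List.pyGetD output (-1) ' ' = ')' then
            let j := pvScanA output ')' '(' 1 ((output.length : Int) - 2)
            let operand := PySem.List.slice output (some j) none
            pvLoopAux expr n (i + 1)
              (PySem.List.slice output none (some j) ++ ('(' :: operand ++ ['|', 'λ', ')']))
          else if PySem.List.pyGetD output (-1) ' ' = ']' then
            let j := pvScanA output ']' '[' 1 ((output.length : Int) - 2)
            let operand := PySem.List.slice output (some j) none
            pvLoopAux expr n (i + 1)
              (PySem.List.slice output none (some j) ++ ('(' :: operand ++ ['|', 'λ', ')']))
          else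
            let operand := [PySem.List.pyGetD output (-1) ' ']
            pvLoopAux expr n (i + 1)
              (PySem.List.slice output none (some (-1)) ++ ('(' :: operand ++ ['|', 'λ', ')']))
        else
          pvLoopAux expr n (i + 1) (output ++ ['(', 'λ', ')'])
      else
        pvLoopAux expr n (i + 1) (output ++ [expr[i]])
    else output

def convert_optional_operator (expr : String) : String :=
  String.ofList (pvLoopAux expr.toList expr.toList.length 0 [])

-- ===== PORT B =====
-- body of B's forward loop over enumerate(buf[:-1]): push unmatched opener positions,
-- pop on a matching closer (guarded `and stack` like the Python)
def pvStackStep (openc closec : Char) (stack : List Int) (pc : Int × Char) : List Int :=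
  if pc.2 = openc then stack ++ [pc.1]
  else if pc.2 = closec ∧ stack ≠ [] then stack.dropLast
  else stack

-- B's _operand_start: one forward pass, top of the stack (None if empty)
def pvOperandStart (buf : List Char) (openc closec : Char) : Option Int :=
  ((PySem.List.enumerate buf.dropLast 0).foldl (pvStackStep openc closec) []).getLast?

-- body of B's `for i, c in enumerate(expr)` loop
def pvStepB (expr : List Char) (out : List Char) (ic : Int × Char) : List Char :=
  if ic.2 = '?' ∧ ¬ (0 < ic.1 ∧ PySem.List.pyGetD expr (ic.1 - 1) ' ' = '\\') then
    if out = [] then out ++ ['(', 'λ', ')']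
    else
      let j? : Option Int :=
        if PySem.List.pyGetD out (-1) ' ' = ')' then pvOperandStart out '(' ')'
        else if PySem.List.pyGetD out (-1) ' ' = ']' then pvOperandStart out '[' ']'
        else none
      let j : Int := j?.getD ((out.length : Int) - 1)
      PySem.List.slice out none (some j) ++
        ('(' :: PySem.List.slice out (some j) none ++ ['|', 'λ', ')'])
  else out ++ [ic.2]

def convert_optional_operator_alt (expr : String) : String :=
  String.ofList ((PySem.List.enumerate expr.toList 0).foldl (pvStepB expr.toList) [])

-- ===== PRECONDITION & SPEC =====
def Spec_convert_optional_operator (expr : String) (out : String) : Prop := out = convert_optional_operator_alt expr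
instance (expr : String) (out : String) : Decidable (Spec_convert_optional_operator expr out) := by unfold Spec_convert_optional_operator; infer_instance

-- ===== CLAIM (what is proved, stated in full; the proofs are below) =====
def Claim_equal_convert_optional_operator : Prop := ∀ (expr : String), Dom_convert_optional_operator expr → Spec_convert_optional_operator expr (convert_optional_operator expr)


-- ===== LEMMAS AND PROOFS =====

-- the stack B's helper builds over the first m characters of cs
def pvStackPfx (openc closec : Char) (cs : List Char) (m : Nat) : List Int :=
  (PySem.List.enumerate (cs.take m) 0).foldl (pvStackStep openc closec) []

lemma pvReverseDropLast {α : Type} (l : List α) : l.dropLast.reverse = l.reverse.tail := by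
  induction l using List.reverseRecOn with
  | nil => simp
  | append_singleton xs a ih => simp

lemma pvStackPfx_succ (openc closec : Char) (cs : List Char) (m : Nat) (h : m < cs.length) :
    pvStackPfx openc closec cs (m + 1) =
      pvStackStep openc closec (pvStackPfx openc closec cs m) ((m : Int), cs[m]) := by
  unfold pvStackPfx
  have ht : cs.take (m + 1) = cs.take m ++ [cs[m]] := by
    rw [List.take_add_one]
    simp [List.getElem?_eq_getElem h]
  rw [ht, PySem.List.enumerate_append, List.foldl_append]
  simp [PySem.List.enumerate_cons, List.length_take, Nat.min_eq_left (Nat.le_of_lt h)]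

-- A's backward counting scan over cs[0..m-1] (started at j = m-1 with counter `count`)
-- returns the `count`-th unmatched opener position from the top of B's forward stack
-- (or -1 when the stack is not that deep).
lemma pvScan_eq_stack (cs : List Char) (openc closec : Char) (hne : openc ≠ closec) :
    ∀ (m : Nat), m ≤ cs.length → ∀ count : Int, 1 ≤ count →
      pvScanAux cs closec openc count m =
        (((pvStackPfx openc closec cs m).reverse)[(count - 1).toNat]?).getD (-1) := by
  intro m
  induction m with
  | zero =>
    intro _ count _
    simp [pvScanAux, pvStackPfx]
  | succ m ih =>
    intro hm count hcount
    have hmlt : m < cs.length := by omega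
    have hget : PySem.List.pyGetD cs ((m : Nat) : Int) ' ' = cs[m] := by
      rw [PySem.List.pyGetD_natCast]
      exact List.getD_eq_getElem cs ' ' hmlt
    have hne' : ¬ (closec = openc) := fun hc => hne hc.symm
    rw [pvScanAux, hget, pvStackPfx_succ openc closec cs m hmlt]
    by_cases hcl : cs[m] = closec
    · rw [if_pos hcl]
      have hstep : pvStackStep openc closec (pvStackPfx openc closec cs m) ((m : Int), cs[m]) =
          (pvStackPfx openc closec cs m).dropLast := by
        by_cases hSe : pvStackPfx openc closec cs m = [] <;>
          · unfold pvStackStep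
            simp [hcl, hne', hSe]
      rw [ih (by omega) (count + 1) (by omega), hstep, pvReverseDropLast, List.getElem?_tail]
      congr 2
      omega
    · by_cases hop : cs[m] = openc
      · rw [if_neg hcl, if_pos hop]
        have hstep : pvStackStep openc closec (pvStackPfx openc closec cs m) ((m : Int), cs[m]) =
            pvStackPfx openc closec cs m ++ [(m : Int)] := by
          unfold pvStackStep; simp [hop]
        rw [hstep, List.reverse_append]
        by_cases hc1 : count - 1 = 0
        · rw [if_pos hc1]
          have h1 : (count - 1).toNat = 0 := by omega
          rw [h1]
          simp
        · rw [if_neg hc1, ih (by omega) (count - 1) (by omega)]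
          have h2 : (count - 1).toNat = (count - 1 - 1).toNat + 1 := by omega
          rw [h2]
          simp
      · rw [if_neg hcl, if_neg hop]
        have hstep : pvStackStep openc closec (pvStackPfx openc closec cs m) ((m : Int), cs[m]) =
            pvStackPfx openc closec cs m := by
          unfold pvStackStep; simp [hop, hcl]
        rw [hstep, ih (by omega) count hcount]

-- instantiation used by the ports: count = 1, scanning out[:-1]
lemma pvScan_eq_operandStart (out : List Char) (openc closec : Char) (hne : openc ≠ closec)
    (hout : out ≠ []) :
    pvScanA out closec openc 1 ((out.length : Int) - 2) =
      (pvOperandStart out openc closec).getD (-1) := by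
  have hlen : 1 ≤ out.length := List.length_pos_iff.mpr hout
  have h := pvScan_eq_stack out openc closec hne (out.length - 1) (by omega) 1 (by omega)
  have hm : ((out.length : Int) - 2 + 1).toNat = out.length - 1 := by omega
  rw [pvScanA, hm, h]
  unfold pvOperandStart pvStackPfx
  rw [← List.dropLast_eq_take]
  congr 1
  rw [List.getLast?_eq_head?_reverse, List.head?_eq_getElem?]
  norm_num

-- the three rewrite shapes produced at a '?': slices at j = len-1 (B) match A's j = -1 forms
lemma pvSliceFrom_last (out : List Char) (hout : out ≠ []) :
    PySem.List.slice out (some ((out.length : Int) - 1)) none = out.drop (out.length - 1) := by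
  have hlen : 1 ≤ out.length := List.length_pos_iff.mpr hout
  have : (out.length : Int) - 1 = ((out.length - 1 : Nat) : Int) := by omega
  rw [this, PySem.List.slice_from_natCast]

lemma pvSliceTo_last (out : List Char) (hout : out ≠ []) :
    PySem.List.slice out none (some ((out.length : Int) - 1)) = out.dropLast := by
  have hlen : 1 ≤ out.length := List.length_pos_iff.mpr hout
  have : (out.length : Int) - 1 = ((out.length - 1 : Nat) : Int) := by omega
  rw [this, PySem.List.slice_to_natCast, List.dropLast_eq_take]

lemma pvDrop_last (out : List Char) (hout : out ≠ []) :
    out.drop (out.length - 1) = [out.getLast hout] := by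
  induction out using List.reverseRecOn with
  | nil => exact absurd rfl hout
  | append_singleton xs a ih => simp

-- one step of A's while-loop produces exactly B's fold step
lemma pvStep_eq (expr : List Char) (n i : Nat) (h : i < expr.length) (out : List Char) :
    pvLoopAux expr (n + 1) i out =
      pvLoopAux expr n (i + 1) (pvStepB expr out ((i : Int), expr[i])) := by
  rw [pvLoopAux, dif_pos h]
  unfold pvStepB
  dsimp only
  by_cases hq : expr[i] = '?'
  · by_cases hesc : 0 < i ∧ PySem.List.pyGetD expr ((i : Int) - 1) ' ' = '\\'
    · simp [hq, hesc.2, Int.natCast_pos, hesc.1]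
    · have hBpos : (expr[i] = '?' ∧
          ¬ ((0 : Int) < (i : Int) ∧ PySem.List.pyGetD expr ((i : Int) - 1) ' ' = '\\')) := by
        refine ⟨hq, fun hcon => hesc ⟨by exact_mod_cast hcon.1, hcon.2⟩⟩
      by_cases hout : out = []
      · subst hout
        rw [if_pos hq, if_neg hesc, if_neg (by simp : ¬ 0 < ([] : List Char).length),
          if_pos hBpos, if_pos rfl]
      · rw [if_pos hq, if_neg hesc, if_pos hBpos, if_neg hout,
          if_pos (List.length_pos_iff.mpr hout)]
        by_cases hpar : PySem.List.pyGetD out (-1) ' ' = ')'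
        · rw [if_pos hpar, if_pos hpar, pvScan_eq_operandStart out '(' ')' (by decide) hout]
          cases hres : pvOperandStart out '(' ')' with
          | some j => simp
          | none =>
            simp only [Option.getD_none]
            rw [PySem.List.slice_from_neg_one, PySem.List.slice_to_neg_one,
              pvSliceFrom_last out hout, pvSliceTo_last out hout, List.dropLast_eq_take]
        · by_cases hbr : PySem.List.pyGetD out (-1) ' ' = ']'
          · rw [if_neg hpar, if_pos hbr, if_neg hpar, if_pos hbr,
              pvScan_eq_operandStart out '[' ']' (by decide) hout]
            cases hres : pvOperandStart out '[' ']' with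
            | some j => simp
            | none =>
              simp only [Option.getD_none]
              rw [PySem.List.slice_from_neg_one, PySem.List.slice_to_neg_one,
                pvSliceFrom_last out hout, pvSliceTo_last out hout, List.dropLast_eq_take]
          · rw [if_neg hpar, if_neg hbr, if_neg hpar, if_neg hbr]
            simp only [Option.getD_none]
            rw [PySem.List.pyGetD_neg_one out ' ' hout, PySem.List.slice_to_neg_one,
              pvSliceFrom_last out hout, pvSliceTo_last out hout,
              pvDrop_last out hout]
  · simp [hq]

lemma pvLoop_eq (expr : List Char) : ∀ (l : List Char) (i : Nat) (out : List Char),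
    expr.drop i = l →
    pvLoopAux expr l.length i out = (PySem.List.enumerate l (i : Int)).foldl (pvStepB expr) out := by
  intro l
  induction l with
  | nil =>
    intro i out _
    simp [PySem.List.enumerate_nil, pvLoopAux]
  | cons c l ih =>
    intro i out hd
    have hi : i < expr.length := by
      by_contra hcon
      rw [List.drop_eq_nil_of_le (by omega)] at hd
      exact List.cons_ne_nil c l hd.symm
    have hdc : expr.drop i = expr[i] :: expr.drop (i + 1) := List.drop_eq_getElem_cons hi
    rw [hdc] at hd
    have hc : expr[i] = c := ((List.cons.injEq _ _ _ _).mp hd).1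
    have hl : expr.drop (i + 1) = l := ((List.cons.injEq _ _ _ _).mp hd).2
    rw [PySem.List.enumerate_cons, List.foldl_cons]
    have hcast : (i : Int) + 1 = ((i + 1 : Nat) : Int) := by push_cast; ring
    rw [← hc, hcast, ← ih (i + 1) _ hl]
    exact pvStep_eq expr l.length i hi out

-- ===== VERDICT (by name: the statement is the Claim_ definition above) =====
theorem convert_optional_operator_spec : Claim_equal_convert_optional_operator := by
  intro expr _
  unfold Spec_convert_optional_operator convert_optional_operator convert_optional_operator_alt
  have := pvLoop_eq expr.toList expr.toList 0 [] rfl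
  simpa using congrArg String.ofList this
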